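-- pv_equiv track=rewrite | github.com/GregHamel/RedditDailyProgrammer | [7-14-2014] Challenge #171 [Easy] Hex to 8x8 Bitmap.py | pic_zoom
-- ===== SOURCE A (Python) =====
-- def pic_zoom(pic):
--     new_pic = []
--     for line in pic:
--         new_line = []
--         for v in line:
--             new_line+=[v,v]
--         new_pic+=[new_line,new_line]
--     return new_pic
-- ===== SOURCE B (Python) =====
-- def pic_zoom(pic):
--     # Closed-form indexing: out[i][j] = pic[i//2][j//2]. No duplication/appending of
--     # pixels; each output cell is looked up directly by index arithmetic. (Return value
--     # only: rows are fresh lists, not aliased in pairs as in A.)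
--     out = []
--     for i in range(2 * len(pic)):
--         row = pic[i // 2]
--         out.append([row[j // 2] for j in range(2 * len(row))])
--     return out
-- ===== Notes on version B (the rewrite author's own statement) =====
-- stated objective: alternative
-- what changed: Replaces A's nested duplication loops (appending each pixel and each row twice) with closed-form index arithmetic: output cell (i,j) is looked up directly as pic[i//2][j//2] over ranges of the doubled dimensions; this also returns fresh rows instead of A's pairwise-aliased rows (return value identical).
import Mathlib
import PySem

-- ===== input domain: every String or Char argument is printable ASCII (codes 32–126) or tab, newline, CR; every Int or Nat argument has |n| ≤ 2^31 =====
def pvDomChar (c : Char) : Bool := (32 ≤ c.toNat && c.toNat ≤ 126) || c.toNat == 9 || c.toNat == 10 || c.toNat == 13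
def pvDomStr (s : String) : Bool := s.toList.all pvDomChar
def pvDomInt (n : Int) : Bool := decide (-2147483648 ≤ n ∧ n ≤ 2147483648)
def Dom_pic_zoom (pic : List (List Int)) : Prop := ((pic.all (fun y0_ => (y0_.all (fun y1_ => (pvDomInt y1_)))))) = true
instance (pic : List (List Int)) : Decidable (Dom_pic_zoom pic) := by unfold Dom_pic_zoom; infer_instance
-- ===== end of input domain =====

-- B computes the 2x zoom by closed-form index arithmetic (out[i][j] = pic[i//2][j//2]) instead of A's
-- nested duplication loops; return-value equivalence only (A's returned rows are aliased in pairs, B's are fresh).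


-- ===== PORT A =====
def pic_zoom (pic : List (List Int)) : List (List Int) :=
  pic.foldl (fun new_pic line =>
    let new_line := line.foldl (fun nl v => nl ++ [v, v]) []
    new_pic ++ [new_line, new_line]) []

-- ===== PORT B =====
-- row[j // 2] / pic[i // 2] are always in range, so the pyGet? never yields none; .getD supplies the (unreachable) default
def pic_zoom_alt (pic : List (List Int)) : List (List Int) :=
  (PySem.List.pyRange 0 (2 * (pic.length : Int)) 1).foldl (fun out i =>
    let row := (PySem.List.pyGet? pic (PySem.Int.floordiv i 2)).getD []
    out ++ [(PySem.List.pyRange 0 (2 * (row.length : Int)) 1).map (fun j =>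
      (PySem.List.pyGet? row (PySem.Int.floordiv j 2)).getD 0)]) []

-- ===== PRECONDITION & SPEC =====
def Spec_pic_zoom (pic : List (List Int)) (out : List (List Int)) : Prop := out = pic_zoom_alt pic
instance (pic : List (List Int)) (out : List (List Int)) : Decidable (Spec_pic_zoom pic out) := by unfold Spec_pic_zoom; infer_instance

-- ===== CLAIM (what is proved, stated in full; the proofs are below) =====
def Claim_equal_pic_zoom : Prop := ∀ (pic : List (List Int)), Dom_pic_zoom pic → Spec_pic_zoom pic (pic_zoom pic)

-- ===== LEMMAS AND PROOFS =====

-- indexing k ↦ l[k/2] over range (2·len) enumerates each element twice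
theorem dup_index {α : Type} (d : α) (l : List α) :
    (List.range (2 * l.length)).map (fun k => (l[k/2]?).getD d) = l.flatMap (fun v => [v, v]) := by
  induction l with
  | nil => rfl
  | cons h t ih =>
    have h2 : 2 * (h :: t).length = 2 + 2 * t.length := by simp [List.length_cons]; ring
    rw [h2, List.range_add, List.map_append, List.map_map]
    have part2 : (List.range (2 * t.length)).map
        ((fun k => (((h :: t)[k/2]?).getD d)) ∘ (fun k => 2 + k)) =
        (List.range (2 * t.length)).map (fun k => ((t[k/2]?).getD d)) := by
      apply List.map_congr_left
      intro k _
      have : (2 + k) / 2 = k / 2 + 1 := by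
        rw [Nat.add_comm]; exact Nat.add_div_right k (by omega)
      simp [Function.comp, this]
    rw [part2, ih]
    rfl

-- the pyRange/pyGet? form of the same fact, with a post-map g
theorem pymap_eq {α β : Type} (d : α) (g : α → β) (l : List α) :
    (PySem.List.pyRange 0 (2 * (l.length : Int)) 1).map
      (fun i => g ((PySem.List.pyGet? l (PySem.Int.floordiv i 2)).getD d)) =
    (l.flatMap (fun v => [v, v])).map g := by
  rw [PySem.List.pyRange_one, List.map_map]
  have hlen : ((2 * (l.length : Int)) - 0).toNat = 2 * l.length := by omega
  rw [hlen]
  have hpt : ∀ k : Nat,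
      ((fun i => g ((PySem.List.pyGet? l (PySem.Int.floordiv i 2)).getD d)) ∘
        (fun k : Nat => (0 : Int) + k)) k = (fun k => g ((l[k/2]?).getD d)) k := by
    intro k
    have hf : PySem.Int.floordiv ((k : Nat) : Int) 2 = (((k / 2 : Nat)) : Int) := by
      exact_mod_cast PySem.Int.floordiv_natCast k 2
    simp only [Function.comp_apply, zero_add, hf, PySem.List.pyGet?_natCast]
  rw [List.map_congr_left (fun k _ => hpt k), ← dup_index d l, List.map_map]
  simp only [Function.comp_def]

theorem pic_zoom_eq_flatMap (pic : List (List Int)) :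
    pic_zoom pic = pic.flatMap (fun line =>
      [line.flatMap (fun v => [v, v]), line.flatMap (fun v => [v, v])]) := by
  unfold pic_zoom
  have inner : ∀ line : List Int,
      line.foldl (fun nl v => nl ++ [v, v]) [] = line.flatMap (fun v => [v, v]) := by
    intro line
    simpa using PySem.List.foldl_append_eq_flatMap (fun v => [v, v]) line []
  have outer := PySem.List.foldl_append_eq_flatMap
    (fun line : List Int => [line.foldl (fun nl v => nl ++ [v, v]) [],
                             line.foldl (fun nl v => nl ++ [v, v]) []]) pic []
  simp only [List.nil_append] at outer
  rw [outer]
  exact List.flatMap_congr (fun line _ => by rw [inner line])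

theorem pic_zoom_alt_eq_flatMap (pic : List (List Int)) :
    pic_zoom_alt pic = pic.flatMap (fun line =>
      [line.flatMap (fun v => [v, v]), line.flatMap (fun v => [v, v])]) := by
  unfold pic_zoom_alt
  rw [PySem.List.foldl_append_singleton_eq_map, List.nil_append]
  have hD : ∀ row : List Int,
      (PySem.List.pyRange 0 (2 * (row.length : Int)) 1).map (fun j =>
        (PySem.List.pyGet? row (PySem.Int.floordiv j 2)).getD 0) =
      row.flatMap (fun v => [v, v]) := by
    intro row
    simpa using pymap_eq 0 (id : Int → Int) row
  rw [pymap_eq ([] : List Int)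
    (fun row : List Int => (PySem.List.pyRange 0 (2 * (row.length : Int)) 1).map (fun j =>
      (PySem.List.pyGet? row (PySem.Int.floordiv j 2)).getD 0)) pic]
  rw [List.map_flatMap]
  exact List.flatMap_congr (fun line _ => by simp only [List.map_cons, List.map_nil, hD line])

-- ===== VERDICT (by name: the statement is the Claim_ definition above) =====
theorem pic_zoom_spec : Claim_equal_pic_zoom := by
  intro pic _
  unfold Spec_pic_zoom
  rw [pic_zoom_eq_flatMap, pic_zoom_alt_eq_flatMap]
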